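-- pv_equiv track=rewrite | github.com/chris-peng-1244/python-quiz | palindromePartitioningMinCuts.py | buildIsPalindromeMatrix
-- ===== SOURCE A (Python) =====
-- def buildIsPalindromeMatrix(string):
--   matrix = [
--     [ False for _ in range(len(string)) ] for _ in range(len(string))
--   ]
--   for i in range(len(string)):
--     for j in range(i, len(string)):
--       matrix[i][j] = isPalindrome(string[i:j+1])
--   return matrix
--
-- def isPalindrome(string):
--   return string == string[::-1]
-- ===== SOURCE B (Python) =====
-- def buildIsPalindromeMatrix(string):
--   n = len(string)
--   matrix = [[False] * n for _ in range(n)]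
--   for length in range(1, n + 1):
--     for i in range(n - length + 1):
--       j = i + length - 1
--       matrix[i][j] = string[i] == string[j] and (length < 3 or matrix[i + 1][j - 1])
--   return matrix
-- ===== Notes on version B (the rewrite author's own statement) =====
-- stated objective: faster
-- what changed: A tests each of the O(n^2) substrings with a fresh slice-and-reverse comparison (O(n^3) total); B fills the same palindrome table by increasing substring length with the DP recurrence matrix[i][j] = s[i]==s[j] and matrix[i+1][j-1], O(n^2) total.
import Mathlib
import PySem

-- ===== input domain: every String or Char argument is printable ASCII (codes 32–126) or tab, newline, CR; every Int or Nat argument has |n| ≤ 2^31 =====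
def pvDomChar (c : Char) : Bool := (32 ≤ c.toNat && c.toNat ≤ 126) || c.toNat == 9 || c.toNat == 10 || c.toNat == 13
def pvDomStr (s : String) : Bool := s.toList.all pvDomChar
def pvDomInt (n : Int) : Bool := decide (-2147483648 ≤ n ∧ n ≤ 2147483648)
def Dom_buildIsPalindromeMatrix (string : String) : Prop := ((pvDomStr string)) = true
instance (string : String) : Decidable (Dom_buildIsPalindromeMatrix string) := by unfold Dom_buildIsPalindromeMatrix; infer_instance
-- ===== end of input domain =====

-- B fills the palindrome table by increasing substring length (matrix[i][j] from matrix[i+1][j-1])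
-- instead of testing every slice against its reverse; objective: faster.

-- ===== PORT A =====
-- matrix[i][j] = v; at every use site in both programs 0 ≤ i,j < len(matrix) (exact there)
def pvSet2 (m : List (List Bool)) (i j : Int) (v : Bool) : List (List Bool) :=
  m.set i.toNat ((m.getD i.toNat []).set j.toNat v)

-- isPalindrome: string == string[::-1]; s[::-1] is reverse (PySem.List.slice?_none_none_neg_one),
-- string equality compared on List Char (exact)
def pvIsPalindrome (t : List Char) : Bool := t == t.reverse

def buildIsPalindromeMatrix (string : String) : List (List Bool) :=
  let cs := string.toList
  let n : Int := PySem.Str.len string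
  let matrix : List (List Bool) :=
    (PySem.List.pyRange 0 n 1).map (fun _ => (PySem.List.pyRange 0 n 1).map (fun _ => false))
  (PySem.List.pyRange 0 n 1).foldl (fun m i =>
    (PySem.List.pyRange i n 1).foldl (fun m j =>
      pvSet2 m i j (pvIsPalindrome (PySem.List.slice cs (some i) (some (j + 1))))) m) matrix

-- ===== PORT B =====
-- string[i] / matrix[i+1][j-1] read with pyGetD: every executed read is at a nonnegative in-range
-- index (the matrix read is short-circuited away by `length < 3` exactly when j-1 could be negative)
def buildIsPalindromeMatrix_alt (string : String) : List (List Bool) :=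
  let cs := string.toList
  let n : Int := PySem.Str.len string
  let matrix : List (List Bool) :=
    (PySem.List.pyRange 0 n 1).map (fun _ => List.replicate n.toNat false)
  (PySem.List.pyRange 1 (n + 1) 1).foldl (fun m length =>
    (PySem.List.pyRange 0 (n - length + 1) 1).foldl (fun m i =>
      let j := i + length - 1
      pvSet2 m i j ((PySem.List.pyGetD cs i ' ' == PySem.List.pyGetD cs j ' ') &&
        (decide (length < 3) || PySem.List.pyGetD (PySem.List.pyGetD m (i + 1) []) (j - 1) false))) m) matrix

-- ===== PRECONDITION & SPEC =====
def Spec_buildIsPalindromeMatrix (string : String) (out : List (List Bool)) : Prop := out = buildIsPalindromeMatrix_alt string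
instance (string : String) (out : List (List Bool)) : Decidable (Spec_buildIsPalindromeMatrix string out) := by unfold Spec_buildIsPalindromeMatrix; infer_instance

-- ===== CLAIM (what is proved, stated in full; the proofs are below) =====
def Claim_equal_buildIsPalindromeMatrix : Prop := ∀ (string : String), Dom_buildIsPalindromeMatrix string → Spec_buildIsPalindromeMatrix string (buildIsPalindromeMatrix string)

-- ===== LEMMAS AND PROOFS =====

-- function-level model of the matrix: pvMat n f is the n×n matrix with entries f i j
def pvMat (n : Nat) (f : Nat → Nat → Bool) : List (List Bool) :=
  (List.range n).map (fun i => (List.range n).map (f i))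

def pvUpd (f : Nat → Nat → Bool) (i j : Nat) (v : Bool) : Nat → Nat → Bool :=
  fun i' j' => if i' = i ∧ j' = j then v else f i' j'

-- the specification value: is string[i:j+1] a palindrome
def pvPal (cs : List Char) (i j : Nat) : Bool :=
  ((cs.drop i).take (j + 1 - i)) == ((cs.drop i).take (j + 1 - i)).reverse

lemma pvMat_congr {n : Nat} {f g : Nat → Nat → Bool}
    (h : ∀ i j, i < n → j < n → f i j = g i j) : pvMat n f = pvMat n g := by
  unfold pvMat
  apply List.map_congr_left
  intro i hi
  apply List.map_congr_left
  intro j hj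
  exact h i j (List.mem_range.mp hi) (List.mem_range.mp hj)

lemma pvSet2_pvMat (n : Nat) (f : Nat → Nat → Bool) (i j : Nat) (hi : i < n) (_hj : j < n) (v : Bool) :
    pvSet2 (pvMat n f) (i : Int) (j : Int) v = pvMat n (pvUpd f i j v) := by
  unfold pvSet2 pvMat pvUpd
  simp only [Int.toNat_natCast]
  have hrow : (((List.range n).map (fun i => (List.range n).map (f i))).getD i [])
      = (List.range n).map (f i) := by
    rw [List.getD_eq_getElem?_getD]
    simp [hi]
  rw [hrow]
  apply List.ext_getElem
  · simp
  · intro k h1 h2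
    simp only [List.getElem_set, List.getElem_map, List.getElem_range]
    by_cases hk : i = k
    · subst hk
      apply List.ext_getElem
      · simp
      · intro l h3 h4
        simp only [List.getElem_map, List.getElem_range]
        by_cases hl : j = l
        · subst hl; simp
        · simp [hl, Ne.symm hl]
    · simp only [if_neg hk]
      apply List.map_congr_left
      intro l _
      simp [Ne.symm hk]

lemma pvSet2_pvMat' (n : Nat) (f : Nat → Nat → Bool) (i j : Int) (hi0 : 0 ≤ i) (hi : i < (n : Int))
    (hj0 : 0 ≤ j) (hj : j < (n : Int)) (v : Bool) :
    pvSet2 (pvMat n f) i j v = pvMat n (pvUpd f i.toNat j.toNat v) := by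
  have h1 : i = ((i.toNat : Nat) : Int) := by omega
  have h2 : j = ((j.toNat : Nat) : Int) := by omega
  rw [h1, h2]
  exact pvSet2_pvMat n f i.toNat j.toNat (by omega) (by omega) v

lemma pvRead_pvMat (n : Nat) (f : Nat → Nat → Bool) (i j : Nat) (hi : i < n) (hj : j < n) :
    PySem.List.pyGetD (PySem.List.pyGetD (pvMat n f) (i : Int) []) (j : Int) false = f i j := by
  unfold pvMat
  simp only [PySem.List.pyGetD_natCast]
  rw [List.getD_eq_getElem?_getD]
  simp [hi, List.getD_eq_getElem?_getD, hj]

lemma foldl_pvMat {α : Type} (n : Nat) (L : List α)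
    (step : List (List Bool) → α → List (List Bool))
    (fstep : (Nat → Nat → Bool) → α → (Nat → Nat → Bool))
    (h : ∀ f x, x ∈ L → step (pvMat n f) x = pvMat n (fstep f x)) (f0 : Nat → Nat → Bool) :
    L.foldl step (pvMat n f0) = pvMat n (L.foldl fstep f0) := by
  induction L generalizing f0 with
  | nil => rfl
  | cons a L ih =>
    rw [List.foldl_cons, List.foldl_cons, h f0 a List.mem_cons_self]
    exact ih (fun f x hx => h f x (List.mem_cons_of_mem a hx)) (fstep f0 a)

-- ---------- A side ----------

def pvStepA (cs : List Char) (i : Int) (f : Nat → Nat → Bool) (j : Int) : Nat → Nat → Bool :=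
  pvUpd f i.toNat j.toNat (pvIsPalindrome (PySem.List.slice cs (some i) (some (j + 1))))

lemma pvSliceVal (cs : List Char) (i j : Nat) :
    pvIsPalindrome (PySem.List.slice cs (some (i : Int)) (some ((j : Int) + 1))) = pvPal cs i j := by
  have h : ((j : Int) + 1) = (((j + 1 : Nat)) : Int) := by push_cast; ring
  rw [h, PySem.List.slice_natCast]
  rfl

lemma pvInnerA (cs : List Char) (i : Nat) :
    ∀ (k a : Nat) (f : Nat → Nat → Bool), cs.length - a = k →
    (PySem.List.pyRange (a : Int) (cs.length : Int) 1).foldl (pvStepA cs (i : Int)) f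
      = fun i' j' => if i' = i ∧ a ≤ j' ∧ j' < cs.length then pvPal cs i j' else f i' j' := by
  intro k
  induction k with
  | zero =>
    intro a f ha
    rw [PySem.List.pyRange_one_eq_nil (by omega)]
    funext i' j'
    rw [List.foldl_nil, if_neg (by omega)]
  | succ k ih =>
    intro a f ha
    rw [PySem.List.pyRange_one_cons (by omega), List.foldl_cons]
    have hstep : pvStepA cs (i : Int) f (a : Int)
        = pvUpd f i a (pvPal cs i a) := by
      unfold pvStepA
      rw [pvSliceVal]
      simp
    rw [hstep]
    have hcast : ((a : Int) + 1) = ((a + 1 : Nat) : Int) := by push_cast; ring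
    rw [hcast, ih (a + 1) _ (by omega)]
    funext i' j'
    by_cases h1 : i' = i ∧ a + 1 ≤ j' ∧ j' < cs.length
    · rw [if_pos h1, if_pos (by omega)]
    · rw [if_neg h1]
      unfold pvUpd
      by_cases h2 : i' = i ∧ j' = a
      · rw [if_pos h2, if_pos (by omega)]
        rw [h2.2]
      · rw [if_neg h2, if_neg (by omega)]

lemma pvOuterA (cs : List Char) :
    ∀ (k a : Nat) (f : Nat → Nat → Bool), cs.length - a = k →
    (PySem.List.pyRange (a : Int) (cs.length : Int) 1).foldl
        (fun f i => (PySem.List.pyRange i (cs.length : Int) 1).foldl (pvStepA cs i) f) f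
      = fun i' j' => if a ≤ i' ∧ i' ≤ j' ∧ j' < cs.length then pvPal cs i' j' else f i' j' := by
  intro k
  induction k with
  | zero =>
    intro a f ha
    rw [PySem.List.pyRange_one_eq_nil (by omega)]
    funext i' j'
    rw [List.foldl_nil, if_neg (by omega)]
  | succ k ih =>
    intro a f ha
    rw [PySem.List.pyRange_one_cons (by omega), List.foldl_cons]
    rw [pvInnerA cs a (cs.length - a) a f rfl]
    have hcast : ((a : Int) + 1) = ((a + 1 : Nat) : Int) := by push_cast; ring
    rw [hcast, ih (a + 1) _ (by omega)]
    funext i' j'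
    by_cases h1 : a + 1 ≤ i' ∧ i' ≤ j' ∧ j' < cs.length
    · rw [if_pos h1, if_pos (by omega)]
    · rw [if_neg h1]
      by_cases h2 : i' = a ∧ a ≤ j' ∧ j' < cs.length
      · rw [if_pos h2, if_pos (by omega), h2.1]
      · rw [if_neg h2, if_neg (by omega)]

lemma pvA_eq (s : String) :
    buildIsPalindromeMatrix s
      = pvMat s.toList.length (fun i j => if i ≤ j then pvPal s.toList i j else false) := by
  have hlen : PySem.Str.len s = (s.toList.length : Int) := by simp [pysem]
  simp only [buildIsPalindromeMatrix, hlen]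
  have hinit : (PySem.List.pyRange 0 (s.toList.length : Int) 1).map
      (fun _ => (PySem.List.pyRange 0 (s.toList.length : Int) 1).map (fun _ => false))
      = pvMat s.toList.length (fun _ _ => false) := by
    unfold pvMat
    simp [PySem.List.pyRange_one, List.map_map, Function.comp_def, List.map_const', List.length_range]
  rw [hinit]
  rw [foldl_pvMat s.toList.length _ _
    (fun f i => (PySem.List.pyRange i (s.toList.length : Int) 1).foldl (pvStepA s.toList i) f)
    (by
      intro f x hx
      have hx' := (PySem.List.mem_pyRange_one).mp hx
      apply foldl_pvMat
      intro g y hy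
      have hy' := (PySem.List.mem_pyRange_one).mp hy
      exact pvSet2_pvMat' s.toList.length g x y (by omega) (by omega) (by omega) (by omega) _)]
  have h0 : ((0 : Int)) = ((0 : Nat) : Int) := by norm_num
  rw [h0, pvOuterA s.toList s.toList.length 0 _ (by omega)]
  apply pvMat_congr
  intro i j hi hj
  by_cases h : i ≤ j
  · rw [if_pos (by omega), if_pos h]
  · rw [if_neg (by omega), if_neg h]

-- ---------- B side ----------

def pvStepB (cs : List Char) (len : Int) (f : Nat → Nat → Bool) (i : Int) : Nat → Nat → Bool :=
  pvUpd f i.toNat (i + len - 1).toNat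
    ((cs.getD i.toNat ' ' == cs.getD (i + len - 1).toNat ' ') &&
      (decide (len < 3) || f (i + 1).toNat (i + len - 1 - 1).toNat))

-- state of the table while filling length L, start positions < a already done
def pvFMid (cs : List Char) (L a : Nat) : Nat → Nat → Bool :=
  fun i j => if i ≤ j ∧ j < cs.length ∧ (j + 1 - i < L ∨ (j + 1 - i = L ∧ i < a)) then pvPal cs i j else false

-- state of the table after all lengths ≤ L
def pvFL (cs : List Char) (L : Nat) : Nat → Nat → Bool :=
  fun i j => if i ≤ j ∧ j < cs.length ∧ j + 1 - i ≤ L then pvPal cs i j else false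

lemma pvGetD (cs : List Char) (m : Nat) (hm : m < cs.length) : cs.getD m ' ' = cs[m] := by
  rw [List.getD_eq_getElem?_getD, List.getElem?_eq_getElem hm]
  rfl

lemma pvPalStep (a b : Char) (l : List Char) :
    ((a :: (l ++ [b])) == (a :: (l ++ [b])).reverse) = ((a == b) && (l == l.reverse)) := by
  rw [Bool.eq_iff_iff]
  simp only [List.reverse_cons, List.reverse_append, List.reverse_cons, List.reverse_nil,
    List.nil_append, List.cons_append, beq_iff_eq, Bool.and_eq_true, List.cons.injEq]
  constructor
  · rintro ⟨rfl, h⟩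
    exact ⟨rfl, List.append_cancel_right h⟩
  · rintro ⟨rfl, h⟩
    exact ⟨rfl, by rw [← h]⟩

lemma pvPalRec (cs : List Char) (i L : Nat) (hL : 1 ≤ L) (hn : i + L ≤ cs.length) :
    pvPal cs i (i + L - 1)
      = ((cs.getD i ' ' == cs.getD (i + L - 1) ' ') &&
          (decide ((L : Int) < 3) || pvPal cs (i + 1) (i + L - 2))) := by
  have hi : i < cs.length := by omega
  rcases Nat.lt_or_ge L 3 with h3 | h3
  · have hd : decide ((L : Int) < 3) = true := by
      rw [decide_eq_true_iff]; exact_mod_cast h3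
    rw [hd, Bool.true_or, Bool.and_true]
    interval_cases L
    · unfold pvPal
      rw [show i + 1 - 1 = i by omega, show i + 1 - i = 1 by omega, pvGetD cs i hi]
      have h1 : List.take 1 (List.drop i cs) = [cs[i]] := by
        rw [List.drop_eq_getElem_cons hi, List.take_succ_cons, List.take_zero]
        rfl
      rw [h1]
      simp
    · have hi1 : i + 1 < cs.length := by omega
      unfold pvPal
      rw [pvGetD cs i hi, show i + 2 - 1 = i + 1 by omega, show i + 1 + 1 - i = 2 by omega,
        pvGetD cs (i+1) hi1, List.drop_eq_getElem_cons hi, List.drop_eq_getElem_cons hi1]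
      rw [Bool.eq_iff_iff]
      simp only [List.take_succ_cons, List.take_zero, List.reverse_cons, List.reverse_nil,
        List.nil_append, List.cons_append, beq_iff_eq, List.cons.injEq, and_true]
      constructor
      · rintro ⟨h, -⟩; exact h
      · intro h; exact ⟨h, h.symm⟩
  · obtain ⟨M, rfl⟩ : ∃ M, L = M + 3 := ⟨L - 3, by omega⟩
    have hd : decide (((M + 3 : Nat) : Int) < 3) = false := by
      rw [decide_eq_false_iff_not]; push_cast; omega
    have hj : i + (M + 3) - 1 < cs.length := by omega
    have hgeq : cs[i + 1 + (M + 1)]'(by omega) = cs[i + (M + 3) - 1]'hj := by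
      congr 1
      omega
    have hdec : (cs.drop i).take (M + 3)
        = cs[i] :: (((cs.drop (i+1)).take (M + 1)) ++ [cs[i + (M + 3) - 1]]) := by
      conv_lhs => rw [List.drop_eq_getElem_cons hi, show M + 3 = (M + 2) + 1 from rfl,
        List.take_succ_cons, show M + 2 = (M + 1) + 1 from rfl, List.take_add_one]
      rw [List.getElem?_drop, List.getElem?_eq_getElem (by omega : i + 1 + (M + 1) < cs.length)]
      simp only [Option.toList_some, hgeq]
    rw [hd, Bool.false_or]
    unfold pvPal
    rw [show i + (M + 3) - 1 + 1 - i = M + 3 by omega, hdec, pvPalStep,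
      pvGetD cs i hi, pvGetD cs (i + (M + 3) - 1) hj,
      show i + (M + 3) - 2 + 1 - (i + 1) = M + 1 by omega]

lemma pvInnerB (cs : List Char) (L : Nat) (hL : 1 ≤ L) (hLn : L ≤ cs.length) :
    ∀ (k a : Nat), cs.length - L + 1 - a = k →
    (PySem.List.pyRange (a : Int) ((cs.length : Int) - (L : Int) + 1) 1).foldl
        (pvStepB cs (L : Int)) (pvFMid cs L a)
      = pvFMid cs L (cs.length - L + 1) := by
  intro k
  induction k with
  | zero =>
    intro a ha
    rw [PySem.List.pyRange_one_eq_nil (by omega), List.foldl_nil]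
    funext i j
    unfold pvFMid
    by_cases h1 : i ≤ j ∧ j < cs.length ∧ (j + 1 - i < L ∨ (j + 1 - i = L ∧ i < a))
    · rw [if_pos h1, if_pos (by omega)]
    · rw [if_neg h1, if_neg (by omega)]
  | succ k ih =>
    intro a ha
    rw [PySem.List.pyRange_one_cons (by omega), List.foldl_cons]
    have hstep : pvStepB cs (L : Int) (pvFMid cs L a) (a : Int) = pvFMid cs L (a + 1) := by
      unfold pvStepB
      have h1 : ((a : Int) + (L : Int) - 1).toNat = a + L - 1 := by omega
      have h2 : ((a : Int) + 1).toNat = a + 1 := by omega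
      rw [h1, h2, Int.toNat_natCast]
      have hval : ((cs.getD a ' ' == cs.getD (a + L - 1) ' ') &&
          (decide ((L : Int) < 3) || pvFMid cs L a (a + 1) (((a : Int) + (L : Int) - 1 - 1).toNat)))
          = pvPal cs a (a + L - 1) := by
        rw [pvPalRec cs a L hL (by omega)]
        by_cases h3 : (L : Int) < 3
        · rw [decide_eq_true h3, Bool.true_or, Bool.true_or]
        · have hL3 : 3 ≤ L := by omega
          have h4 : ((a : Int) + (L : Int) - 1 - 1).toNat = a + L - 2 := by omega
          rw [h4]
          have h5 : pvFMid cs L a (a + 1) (a + L - 2) = pvPal cs (a + 1) (a + L - 2) := by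
            unfold pvFMid
            rw [if_pos (by constructor; omega; constructor; omega; left; omega)]
          rw [h5]
      rw [hval]
      funext i j
      unfold pvUpd pvFMid
      by_cases h6 : i = a ∧ j = a + L - 1
      · rw [if_pos h6, if_pos (by omega)]
        rw [h6.1, h6.2]
      · rw [if_neg h6]
        by_cases h7 : i ≤ j ∧ j < cs.length ∧ (j + 1 - i < L ∨ (j + 1 - i = L ∧ i < a))
        · rw [if_pos h7, if_pos (by omega)]
        · rw [if_neg h7, if_neg (by omega)]
    rw [hstep]
    have hcast : ((a : Int) + 1) = ((a + 1 : Nat) : Int) := by push_cast; ring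
    rw [hcast, ih (a + 1) (by omega)]

lemma pvFMid_top (cs : List Char) (L : Nat) (hL : 1 ≤ L) :
    pvFMid cs L (cs.length - L + 1) = pvFL cs L := by
  funext i j
  unfold pvFMid pvFL
  by_cases h : i ≤ j ∧ j < cs.length ∧ j + 1 - i ≤ L
  · rw [if_pos (by omega), if_pos h]
  · rw [if_neg (by omega), if_neg h]

lemma pvFMid_bot (cs : List Char) (L : Nat) (hL : 1 ≤ L) :
    pvFMid cs L 0 = pvFL cs (L - 1) := by
  funext i j
  unfold pvFMid pvFL
  by_cases h : i ≤ j ∧ j < cs.length ∧ j + 1 - i ≤ L - 1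
  · rw [if_pos (by omega), if_pos h]
  · rw [if_neg (by omega), if_neg h]

lemma pvOuterB (cs : List Char) :
    ∀ (k a : Nat), 1 ≤ a → a + k = cs.length + 1 →
    (PySem.List.pyRange (a : Int) ((cs.length : Int) + 1) 1).foldl
        (fun f len => (PySem.List.pyRange 0 ((cs.length : Int) - len + 1) 1).foldl (pvStepB cs len) f)
        (pvFL cs (a - 1))
      = pvFL cs cs.length := by
  intro k
  induction k with
  | zero =>
    intro a h1 h2
    rw [PySem.List.pyRange_one_eq_nil (by omega), List.foldl_nil]
    have : a - 1 = cs.length := by omega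
    rw [this]
  | succ k ih =>
    intro a h1 h2
    rw [PySem.List.pyRange_one_cons (by omega), List.foldl_cons]
    have hstep : (PySem.List.pyRange 0 ((cs.length : Int) - (a : Int) + 1) 1).foldl
        (pvStepB cs (a : Int)) (pvFL cs (a - 1)) = pvFL cs a := by
      rw [← pvFMid_bot cs a h1, ← pvFMid_top cs a h1]
      have h0 : ((0 : Int)) = ((0 : Nat) : Int) := by norm_num
      rw [h0, pvInnerB cs a h1 (by omega) (cs.length - a + 1) 0 (by omega)]
    rw [hstep]
    have hcast : ((a : Int) + 1) = ((a + 1 : Nat) : Int) := by push_cast; ring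
    rw [hcast]
    exact ih (a + 1) (by omega) (by omega)

lemma pvB_eq (s : String) :
    buildIsPalindromeMatrix_alt s
      = pvMat s.toList.length (fun i j => if i ≤ j then pvPal s.toList i j else false) := by
  have hlen : PySem.Str.len s = (s.toList.length : Int) := by simp [pysem]
  simp only [buildIsPalindromeMatrix_alt, hlen]
  have hinit : (PySem.List.pyRange 0 ((s.toList.length : Int)) 1).map
      (fun _ => List.replicate ((s.toList.length : Int)).toNat false)
      = pvMat s.toList.length (fun _ _ => false) := by
    unfold pvMat
    simp [PySem.List.pyRange_one, List.map_map, Function.comp_def, List.map_const', List.length_range]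
  rw [hinit]
  rw [foldl_pvMat s.toList.length _ _
    (fun f len => (PySem.List.pyRange 0 ((s.toList.length : Int) - len + 1) 1).foldl (pvStepB s.toList len) f)
    (by
      intro f len hlen'
      have hb := (PySem.List.mem_pyRange_one).mp hlen'
      apply foldl_pvMat
      intro g x hx
      have hxb := (PySem.List.mem_pyRange_one).mp hx
      have hval : ((PySem.List.pyGetD s.toList x ' ' == PySem.List.pyGetD s.toList (x + len - 1) ' ') &&
            (decide (len < 3) ||
              PySem.List.pyGetD (PySem.List.pyGetD (pvMat s.toList.length g) (x + 1) []) (x + len - 1 - 1) false))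
          = ((s.toList.getD x.toNat ' ' == s.toList.getD (x + len - 1).toNat ' ') &&
              (decide (len < 3) || g (x + 1).toNat (x + len - 1 - 1).toNat)) := by
        rw [PySem.List.pyGetD_of_nonneg s.toList ' ' (by omega), PySem.List.pyGetD_of_nonneg s.toList ' ' (by omega)]
        by_cases h3 : len < 3
        · rw [decide_eq_true h3, Bool.true_or, Bool.true_or]
        · have e1 : (x + 1) = (((x + 1).toNat : Nat) : Int) := by omega
          have e2 : (x + len - 1 - 1) = (((x + len - 1 - 1).toNat : Nat) : Int) := by omega
          rw [e1, e2, pvRead_pvMat s.toList.length g _ _ (by omega) (by omega),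
            Int.toNat_natCast, Int.toNat_natCast]
      rw [hval]
      exact pvSet2_pvMat' s.toList.length g x (x + len - 1) (by omega) (by omega) (by omega) (by omega) _)]
  have hf0 : (fun (_ _ : Nat) => false) = pvFL s.toList 0 := by
    funext i j
    unfold pvFL
    by_cases h : i ≤ j ∧ j < s.toList.length ∧ j + 1 - i ≤ 0
    · omega
    · rw [if_neg h]
  have houter : (PySem.List.pyRange 1 ((s.toList.length : Int) + 1) 1).foldl
      (fun f len => (PySem.List.pyRange 0 ((s.toList.length : Int) - len + 1) 1).foldl (pvStepB s.toList len) f)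
      (pvFL s.toList 0) = pvFL s.toList s.toList.length := by
    simpa using pvOuterB s.toList s.toList.length 1 (by omega) (by omega)
  rw [hf0, houter]
  apply pvMat_congr
  intro i j hi hj
  unfold pvFL
  by_cases h : i ≤ j
  · rw [if_pos (by omega), if_pos h]
  · rw [if_neg (by omega), if_neg h]

-- ===== VERDICT (by name: the statement is the Claim_ definition above) =====
theorem buildIsPalindromeMatrix_spec : Claim_equal_buildIsPalindromeMatrix := by
  intro s _
  unfold Spec_buildIsPalindromeMatrix
  rw [pvA_eq, pvB_eq]
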